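-- pv_equiv track=rewrite | github.com/Krunkmilkshake/Linear-Regression-Program | Regression.py | vert
-- ===== SOURCE A (Python) =====
-- def vert(points_set):
--     """
--     This function will determined if all the pints are on the same x-coordinate.
--     If they are it will return a tuple (True, first-x-value). If not, it should
--     return a tuple (False, first-x-value).
--     """
--
--     xs_are_equal = True
--     x_val = 0
--     # gets a x-value to test for
--     for point in points_set:
--         x_val = point[0]
--
--     # now that we have a x-value, we can check all points against it
--     for point in points_set:
--         if point[0] != x_val:
--             xs_are_equal = False
--
--     # Return based on the bool state of xs_area_equal
--     if xs_are_equal: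
--         return True, x_val
--     else:
--         return False, x_val
-- ===== SOURCE B (Python) =====
-- def vert(points_set):
--     x_val = 0
--     seen = set()
--     for point in points_set:
--         x_val = point[0]
--         seen.add(point[0])
--     return (len(seen) <= 1, x_val)
-- ===== Notes on version B (the rewrite author's own statement) =====
-- stated objective: idiomatic
-- what changed: Fuses A's two loops (last-x extraction, then a mismatch-flag scan) into one pass that collects the distinct x-values in a set and tests len(seen) <= 1.
import Mathlib
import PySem

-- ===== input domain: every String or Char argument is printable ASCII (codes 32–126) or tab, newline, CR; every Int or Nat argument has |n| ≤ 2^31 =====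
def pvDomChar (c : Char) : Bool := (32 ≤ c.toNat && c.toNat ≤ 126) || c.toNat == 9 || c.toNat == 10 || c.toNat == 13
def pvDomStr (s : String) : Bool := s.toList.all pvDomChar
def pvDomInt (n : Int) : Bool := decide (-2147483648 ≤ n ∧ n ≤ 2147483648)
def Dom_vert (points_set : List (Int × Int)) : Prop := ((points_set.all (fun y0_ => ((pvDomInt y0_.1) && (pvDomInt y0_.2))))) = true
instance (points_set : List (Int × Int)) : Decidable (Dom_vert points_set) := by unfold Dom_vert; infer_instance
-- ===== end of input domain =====

-- B fuses A's two loops into one pass that maintains a set of distinct x-values (idiomatic; same cost).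

-- ===== PORT A =====
def vert (points_set : List (Int × Int)) : Bool × Int :=
  -- x_val = 0; for point in points_set: x_val = point[0]
  let x_val : Int := points_set.foldl (fun _ point => point.1) 0
  -- xs_are_equal = True; second loop sets it to False on any mismatch
  let xs_are_equal : Bool :=
    points_set.foldl (fun b point => if point.1 ≠ x_val then false else b) true
  if xs_are_equal then (true, x_val) else (false, x_val)

-- ===== PORT B =====
def vert_alt (points_set : List (Int × Int)) : Bool × Int :=
  -- x_val = 0; seen = set(); one loop: x_val = point[0]; seen.add(point[0])
  let st : PySem.Set Int × Int :=
    points_set.foldl (fun st point => (PySem.Set.add st.1 point.1, point.1))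
      (PySem.Set.empty, 0)
  (decide (PySem.Set.len st.1 ≤ 1), st.2)

-- ===== PRECONDITION & SPEC =====
def Spec_vert (points_set : List (Int × Int)) (out : Bool × Int) : Prop := out = vert_alt points_set
instance (points_set : List (Int × Int)) (out : Bool × Int) : Decidable (Spec_vert points_set out) := by unfold Spec_vert; infer_instance

-- ===== CLAIM (what is proved, stated in full; the proofs are below) =====
def Claim_equal_vert : Prop := ∀ (points_set : List (Int × Int)), Dom_vert points_set → Spec_vert points_set (vert points_set)

-- ===== LEMMAS AND PROOFS =====
theorem lastD_cons (l : List Int) (x a : Int) :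
    (x :: l).getLast?.getD a = l.getLast?.getD x := by
  cases h : l.getLast? with
  | none => simp_all [List.getLast?_eq_none_iff]
  | some b => simp [List.getLast?_cons, h]

theorem lastx (ps : List (Int × Int)) (a : Int) :
    ps.foldl (fun _ p => p.1) a = ((ps.map Prod.fst).getLast?).getD a := by
  induction ps generalizing a with
  | nil => rfl
  | cons p t ih => simp [List.foldl, ih, lastD_cons]

theorem flagfold (ps : List (Int × Int)) (v : Int) (b : Bool) :
    ps.foldl (fun b p => if p.1 ≠ v then false else b) b
      = (b && ps.all (fun p => p.1 == v)) := by
  induction ps generalizing b with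
  | nil => simp
  | cons p t ih =>
    simp only [List.foldl, List.all_cons, ih]
    by_cases h : p.1 = v <;> simp [h]

theorem setfold (ps : List (Int × Int)) (s : PySem.Set Int) (a : Int) :
    ps.foldl (fun st p => (PySem.Set.add st.1 p.1, p.1)) (s, a)
      = (PySem.Set.update s (ps.map Prod.fst), ((ps.map Prod.fst).getLast?).getD a) := by
  induction ps generalizing s a with
  | nil => rfl
  | cons p t ih => simp [List.foldl, ih, PySem.Set.update, lastD_cons]

theorem len_ofList_le_one (xs : List Int) :
    PySem.Set.len (PySem.Set.ofList xs) ≤ 1 ↔ ∀ x ∈ xs, ∀ y ∈ xs, x = y := by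
  constructor
  · intro h x hx y hy
    have hx' : x ∈ PySem.Set.ofList xs := (PySem.Set.mem_ofList _ _).2 hx
    have hy' : y ∈ PySem.Set.ofList xs := (PySem.Set.mem_ofList _ _).2 hy
    cases hs : PySem.Set.ofList xs with
    | nil => simp [hs] at hx'
    | cons a t =>
      have ht : t = [] := by
        have h' : (a :: t).length ≤ 1 := by simpa [PySem.Set.len, hs] using h
        simpa using h'
      subst ht
      rw [hs] at hx' hy'; simp at hx' hy'; simp [hx', hy']
  · intro h
    cases xs with
    | nil => simp [PySem.Set.len, PySem.Set.ofList]
    | cons a t =>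
      have heq : PySem.Set.ofList (a :: t) = [a] := by
        have hsub : ∀ x ∈ PySem.Set.ofList (a :: t), x = a := by
          intro x hx
          exact h x ((PySem.Set.mem_ofList _ _).1 hx) a (by simp)
        have hmem : a ∈ PySem.Set.ofList (a :: t) := (PySem.Set.mem_ofList _ _).2 (by simp)
        have hnd := PySem.Set.nodup_ofList (xs := a :: t)
        cases hs : PySem.Set.ofList (a :: t) with
        | nil => rw [hs] at hmem; simp at hmem
        | cons b u =>
          rw [hs] at hsub hnd
          have hb : b = a := hsub b (by simp)
          have hu : u = [] := by
            by_contra hne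
            obtain ⟨c, hc⟩ := List.exists_mem_of_ne_nil u hne
            have hca : c = a := hsub c (by simp [hc])
            have hbn : b ∉ u := (List.nodup_cons.1 hnd).1
            exact hbn (by rw [hb, ← hca]; exact hc)
          simp [hb, hu]
      simp [heq, PySem.Set.len]

theorem main_eq (ps : List (Int × Int)) :
    (ps.all fun p => p.1 == ((ps.map Prod.fst).getLast?).getD 0)
      = decide (PySem.Set.len (PySem.Set.ofList (ps.map Prod.fst)) ≤ 1) := by
  set xs := ps.map Prod.fst with hxs
  set L := xs.getLast?.getD 0 with hL
  have hiff : ((ps.all fun p => p.1 == L) = true)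
      ↔ (decide (PySem.Set.len (PySem.Set.ofList xs) ≤ 1) = true) := by
    simp only [List.all_eq_true, beq_iff_eq, decide_eq_true_eq, len_ofList_le_one]
    constructor
    · intro h x hx y hy
      rw [hxs] at hx hy
      obtain ⟨p, hp, rfl⟩ := List.mem_map.1 hx
      obtain ⟨q, hq, rfl⟩ := List.mem_map.1 hy
      rw [h p hp, h q hq]
    · intro h p hp
      have hpx : p.1 ∈ xs := by rw [hxs]; exact List.mem_map.2 ⟨p, hp, rfl⟩
      have hne : xs ≠ [] := List.ne_nil_of_mem hpx
      obtain ⟨l, hl⟩ := Option.isSome_iff_exists.1 (List.getLast?_isSome.2 hne)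
      have hlm : l ∈ xs := List.mem_of_getLast? hl
      have : L = l := by rw [hL, hl]; rfl
      rw [this]
      exact h _ hpx _ hlm
  exact Bool.coe_iff_coe.mp hiff

-- ===== VERDICT (by name: the statement is the Claim_ definition above) =====
theorem vert_spec : Claim_equal_vert := by
  intro ps _
  unfold Spec_vert vert vert_alt
  simp only [lastx, flagfold, setfold, Bool.true_and]
  have hupd : PySem.Set.update PySem.Set.empty (ps.map Prod.fst)
      = PySem.Set.ofList (ps.map Prod.fst) := by
    rw [PySem.Set.ofList_eq_foldl]; rfl
  rw [hupd, ← main_eq]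
  cases hb : (ps.all fun p => p.1 == ((ps.map Prod.fst).getLast?).getD 0) <;> simp
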